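-- pv_equiv track=rewrite | github.com/ghazalehnt/SBR | SBR/scripts/create_fold_splits_gr_dataset.py | get_user_interactions
-- ===== SOURCE A (Python) =====
-- def get_user_interactions(inters):
--     user_inters = {}
--     for line in inters:
--         user_id = line[1]
--         if user_id not in user_inters:
--             user_inters[user_id] = []
--         user_inters[user_id].append(line)
--     return user_inters
-- ===== SOURCE B (Python) =====
-- def get_user_interactions(inters):
--     # Two-pass grouping: collect the distinct user_ids in first-occurrence
--     # order, then build each user's group by filtering the whole input.
--     order = dict.fromkeys(line[1] for line in inters)
--     return {uid: [line for line in inters if line[1] == uid] for uid in order}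
-- ===== Notes on version B (the rewrite author's own statement) =====
-- stated objective: alternative
-- what changed: Replaces A's incremental hash-bucket accumulation (one dict mutated per line) with a two-pass map/filter formulation: first dedup the user_ids in order, then build each group as a filter of the input.
import Mathlib
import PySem

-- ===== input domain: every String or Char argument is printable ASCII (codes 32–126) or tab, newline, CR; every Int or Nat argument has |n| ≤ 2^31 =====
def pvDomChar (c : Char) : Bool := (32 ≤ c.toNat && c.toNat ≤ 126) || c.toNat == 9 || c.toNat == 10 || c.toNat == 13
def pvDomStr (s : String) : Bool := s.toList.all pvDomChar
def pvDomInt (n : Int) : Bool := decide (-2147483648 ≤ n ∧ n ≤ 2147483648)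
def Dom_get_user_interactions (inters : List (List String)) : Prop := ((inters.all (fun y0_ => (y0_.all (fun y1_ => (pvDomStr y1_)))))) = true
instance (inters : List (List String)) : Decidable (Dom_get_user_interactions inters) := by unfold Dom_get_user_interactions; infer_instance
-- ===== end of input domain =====

-- B replaces A's incremental hash-bucket grouping with a two-pass map/filter
-- formulation (dedup the user_ids in order, then filter the input per id);
-- same result, no speed claim.

-- line[1]; Python raises IndexError when len(line) < 2 — those inputs are excluded by Pre_,
-- the .getD "" default is never reached inside Pre_.
def pvUserId (line : List String) : String := (PySem.List.pyGet? line 1).getD ""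

-- ===== PORT A =====
def get_user_interactions (inters : List (List String)) : List (String × List (List String)) :=
  (inters.foldl (fun user_inters line =>
      let user_id := pvUserId line
      let d := if user_inters.contains user_id then user_inters
               else user_inters.insert user_id ([] : List (List String))
      d.modify user_id [] (· ++ [line]))
    (PySem.Dict.empty : PySem.Dict String (List (List String)))).items

-- ===== PORT B =====
def get_user_interactions_alt (inters : List (List String)) : List (String × List (List String)) :=
  let order := PySem.List.dedup (inters.map pvUserId)
  order.map (fun uid => (uid, inters.filter (fun line => pvUserId line == uid)))

-- ===== PRECONDITION & SPEC =====
-- Pre_: every line has at least 2 fields; on shorter lines Python A raises IndexError.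
def Pre_get_user_interactions (inters : List (List String)) : Prop :=
  ∀ line ∈ inters, 2 ≤ line.length
instance (inters : List (List String)) : Decidable (Pre_get_user_interactions inters) := by
  unfold Pre_get_user_interactions; infer_instance

def pvWitness_get_user_interactions : List (List String) :=
  [["i1", "u1"], ["i2", "u2", "x"], ["i3", "u1"]]

def Spec_get_user_interactions (inters : List (List String)) (out : List (String × List (List String))) : Prop := out = get_user_interactions_alt inters
instance (inters : List (List String)) (out : List (String × List (List String))) : Decidable (Spec_get_user_interactions inters out) := by unfold Spec_get_user_interactions; infer_instance

-- ===== CLAIM (what is proved, stated in full; the proofs are below) =====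
def Claim_equal_get_user_interactions : Prop := ∀ (inters : List (List String)), Dom_get_user_interactions inters → Pre_get_user_interactions inters → Spec_get_user_interactions inters (get_user_interactions inters)

-- ===== LEMMAS AND PROOFS =====

-- A's loop body: the "if absent, insert []" step followed by the append is one `modify`.
lemma pv_body_eq (d : PySem.Dict String (List (List String))) (line : List String) :
    (if d.contains (pvUserId line) then d
     else d.insert (pvUserId line) ([] : List (List String))).modify (pvUserId line) [] (· ++ [line])
    = d.modify (pvUserId line) [] (· ++ [line]) := by
  by_cases h : d.contains (pvUserId line) = true
  · simp [h]
  · have h' : d.contains (pvUserId line) = false := by simpa using h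
    have hk : pvUserId line ∉ d.keys := by
      intro hm; rw [← PySem.Dict.contains_iff_mem_keys] at hm; simp [h'] at hm
    have hne : ∀ p ∈ d.items, ¬ p.1 = pvUserId line := by
      intro p hp he; exact hk (he ▸ List.mem_map_of_mem hp)
    have hf : List.find? (fun p => p.1 == pvUserId line) d.items = none := by
      rw [List.find?_eq_none]; intro p hp; simpa using hne p hp
    simp [PySem.Dict.modify, PySem.Dict.insert, PySem.Dict.getD, PySem.Dict.get?, h', hf]
    calc List.map (fun p => if p.1 = pvUserId line then (pvUserId line, [line]) else p) d.items
        = List.map id d.items := List.map_congr_left fun p hp => by simp [hne p hp]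
      _ = d.items := List.map_id d.items

-- A's whole fold is the plain grouping fold.
lemma pv_fold_eq (inters : List (List String)) :
    inters.foldl (fun user_inters line =>
      let user_id := pvUserId line
      let d := if user_inters.contains user_id then user_inters
               else user_inters.insert user_id ([] : List (List String))
      d.modify user_id [] (· ++ [line]))
      (PySem.Dict.empty : PySem.Dict String (List (List String)))
    = inters.foldl (fun d line => d.modify (pvUserId line) [] (· ++ [line])) PySem.Dict.empty := by
  have hfun : (fun (user_inters : PySem.Dict String (List (List String))) line =>
      let user_id := pvUserId line
      let d := if user_inters.contains user_id then user_inters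
               else user_inters.insert user_id ([] : List (List String))
      d.modify user_id [] (· ++ [line]))
      = (fun d line => d.modify (pvUserId line) [] (· ++ [line])) := by
    funext d line; exact pv_body_eq d line
  rw [hfun]

-- the grouping fold's lookup at any key is the filter of the input at that key
lemma pv_getD_fold (inters : List (List String)) (c : String) :
    (inters.foldl (fun d line => d.modify (pvUserId line) [] (· ++ [line]))
      (PySem.Dict.empty : PySem.Dict String (List (List String)))).getD c []
    = inters.filter (fun line => pvUserId line == c) := by
  have h := PySem.Dict.getD_foldl_modify_append
    (l := inters.map (fun line => (pvUserId line, line)))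
    (d := (PySem.Dict.empty : PySem.Dict String (List (List String)))) (c := c)
  rw [List.foldl_map] at h
  rw [h, List.filter_map]
  simp [Function.comp_def]

theorem get_user_interactions_spec_aux (inters : List (List String)) :
    get_user_interactions inters = get_user_interactions_alt inters := by
  unfold get_user_interactions get_user_interactions_alt
  rw [pv_fold_eq]
  set D := inters.foldl (fun d line => d.modify (pvUserId line) [] (· ++ [line]))
    (PySem.Dict.empty : PySem.Dict String (List (List String))) with hD
  have hkeys : D.keys = PySem.List.dedup (inters.map pvUserId) := by
    rw [hD, PySem.Dict.keys_foldl_modify_key]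
    simp [PySem.Set.update_nil_left]
  have hnd : D.keys.Nodup := by
    rw [hkeys]; exact PySem.List.nodup_dedup _
  rw [PySem.Dict.items_eq_map_keys D hnd [], hkeys]
  exact List.map_congr_left fun uid _ => by rw [hD, pv_getD_fold]

-- ===== VERDICT (by name: the statement is the Claim_ definition above) =====
theorem get_user_interactions_spec : Claim_equal_get_user_interactions := by
  intro inters _ _
  exact get_user_interactions_spec_aux inters
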